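-- pv_equiv track=rewrite | github.com/AshokVivek/Products | bank-connect-quality/fsm_lambdas/library/fitz_functions.py | removeduplicates_from_name_double_occurances
-- ===== SOURCE A (Python) =====
-- def removeduplicates_from_name_double_occurances(name):
--     # RAM RAM KUMAR KUMAR -> RAM KUMAR
--
--     modified_list = []
--     splitted = name.split(" ")
--     if(len(splitted)%2)==0:
--         for i in range(0,len(splitted),2):
--             if splitted[i]==splitted[i+1]:
--                 modified_list.append(splitted[i])
--             else:
--                 return name
--     else:
--         return name
--
--     return " ".join(modified_list)
-- ===== SOURCE B (Python) =====
-- def removeduplicates_from_name_double_occurances(name):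
--     splitted = name.split(" ")
--     evens = [w for i, w in enumerate(splitted) if i % 2 == 0]
--     odds = [w for i, w in enumerate(splitted) if i % 2 == 1]
--     if evens == odds:
--         return " ".join(evens)
--     return name
-- ===== Notes on version B (the rewrite author's own statement) =====
-- stated objective: simpler
-- what changed: Replaces the even-length guard plus index-pair loop with early return by partitioning the tokens into even- and odd-position lists and one whole-list equality test (odd length falls out as a length mismatch).
import Mathlib
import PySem

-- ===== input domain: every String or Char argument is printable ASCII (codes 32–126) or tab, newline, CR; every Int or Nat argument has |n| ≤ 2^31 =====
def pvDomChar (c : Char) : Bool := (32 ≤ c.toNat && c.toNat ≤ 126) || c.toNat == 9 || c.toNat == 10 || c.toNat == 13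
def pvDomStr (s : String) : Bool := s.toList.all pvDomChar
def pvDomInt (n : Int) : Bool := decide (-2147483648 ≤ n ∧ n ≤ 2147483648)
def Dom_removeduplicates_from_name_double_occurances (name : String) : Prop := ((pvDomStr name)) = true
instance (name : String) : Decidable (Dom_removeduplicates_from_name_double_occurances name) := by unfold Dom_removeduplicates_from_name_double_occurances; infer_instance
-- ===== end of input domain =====

-- B replaces A's even-length guard and index-pair loop (early return) by a parity partition
-- of the tokens and one whole-list equality test — simpler decomposition, same O(n) cost.


-- ===== PORT A =====
-- name.split(" "): split? is some for the nonempty separator " ", so .getD [] is exact.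
-- the 'for i in range(0, len(splitted), 2)' loop with early return, as the obvious
-- structural recursion on the index; splitted[i]/splitted[i+1] via getD "" is exact here
-- because the loop only runs under the even-length guard, so i and i+1 are in range.
def pvLoopA (splitted : List String) (i : Nat) (modified : List String) : Option (List String) :=
  if i < splitted.length then
    if splitted.getD i "" = splitted.getD (i + 1) "" then
      pvLoopA splitted (i + 2) (modified ++ [splitted.getD i ""])
    else none
  else some modified
termination_by splitted.length - i

def removeduplicates_from_name_double_occurances (name : String) : String :=
  let splitted := (PySem.Str.split? name " ").getD []
  if splitted.length % 2 = 0 then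
    match pvLoopA splitted 0 [] with
    | some modified_list => PySem.Str.join " " modified_list
    | none => name
  else name

-- ===== PORT B =====
def removeduplicates_from_name_double_occurances_alt (name : String) : String :=
  let splitted := (PySem.Str.split? name " ").getD []
  let evens := ((PySem.List.enumerate splitted 0).filter (fun p => p.1 % 2 = 0)).map (fun p => p.2)
  let odds := ((PySem.List.enumerate splitted 0).filter (fun p => p.1 % 2 = 1)).map (fun p => p.2)
  if evens = odds then PySem.Str.join " " evens else name

-- ===== PRECONDITION & SPEC =====
def Spec_removeduplicates_from_name_double_occurances (name : String) (out : String) : Prop := out = removeduplicates_from_name_double_occurances_alt name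
instance (name : String) (out : String) : Decidable (Spec_removeduplicates_from_name_double_occurances name out) := by unfold Spec_removeduplicates_from_name_double_occurances; infer_instance

-- ===== CLAIM (what is proved, stated in full; the proofs are below) =====
def Claim_equal_removeduplicates_from_name_double_occurances : Prop := ∀ (name : String), Dom_removeduplicates_from_name_double_occurances name → Spec_removeduplicates_from_name_double_occurances name (removeduplicates_from_name_double_occurances name)

-- ===== LEMMAS AND PROOFS =====

-- proof-side characterisation: the even- and odd-position sublists
def pvEv : List String → List String
  | [] => []
  | [a] => [a]
  | a :: _ :: t => a :: pvEv t

def pvOd : List String → List String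
  | [] => []
  | [_] => []
  | _ :: b :: t => b :: pvOd t

theorem pvEv_filter (l : List String) : ∀ (s : Int), s % 2 = 0 →
    ((PySem.List.enumerate l s).filter (fun p => p.1 % 2 = 0)).map (fun p => p.2) = pvEv l := by
  induction l using pvEv.induct with
  | case1 => intro s hs; simp [PySem.List.enumerate, pvEv]
  | case2 a =>
    intro s hs
    have hd0 : (2:Int) ∣ s := Int.dvd_of_emod_eq_zero hs
    simp [PySem.List.enumerate, pvEv, hd0]
  | case3 a b t ih =>
    intro s hs
    have hd0 : (2:Int) ∣ s := Int.dvd_of_emod_eq_zero hs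
    have hd1 : ¬ (2:Int) ∣ (s + 1) := by omega
    have h2 : (s + 1 + 1) % 2 = 0 := by omega
    simp [PySem.List.enumerate, pvEv, hd0, hd1]
    simpa using ih _ h2

theorem pvOd_filter (l : List String) : ∀ (s : Int), s % 2 = 0 →
    ((PySem.List.enumerate l s).filter (fun p => p.1 % 2 = 1)).map (fun p => p.2) = pvOd l := by
  induction l using pvOd.induct with
  | case1 => intro s hs; simp [PySem.List.enumerate, pvOd]
  | case2 a => intro s hs; simp [PySem.List.enumerate, pvOd]; omega
  | case3 a b t ih =>
    intro s hs
    have h0 : s % 2 ≠ 1 := by omega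
    have h1 : (s + 1) % 2 = 1 := by omega
    have h2 : (s + 1 + 1) % 2 = 0 := by omega
    simp [PySem.List.enumerate, pvOd, h0, h1, ih _ h2]

theorem pvEv_length (l : List String) : (pvEv l).length = (l.length + 1) / 2 := by
  induction l using pvEv.induct with
  | case1 => simp [pvEv]
  | case2 a => simp [pvEv]
  | case3 a b t ih => simp [pvEv, ih]; omega

theorem pvOd_length (l : List String) : (pvOd l).length = l.length / 2 := by
  induction l using pvOd.induct with
  | case1 => simp [pvOd]
  | case2 a => simp [pvOd]
  | case3 a b t ih => simp [pvOd, ih]; omega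

theorem pvLoopA_eq (l : List String) : ∀ (n i : Nat) (m : List String),
    l.length - i = n → n % 2 = 0 → i ≤ l.length →
    pvLoopA l i m =
      if pvEv (l.drop i) = pvOd (l.drop i) then some (m ++ pvEv (l.drop i)) else none := by
  intro n
  induction n using Nat.strong_induction_on with
  | _ n ih =>
    intro i m hn hpar hile
    by_cases hlt : i < l.length
    · have h2 : 2 ≤ n := by omega
      have hi1 : i + 1 < l.length := by omega
      have hd : l.drop i = l[i] :: l[i+1] :: l.drop (i + 2) := by
        rw [List.drop_eq_getElem_cons hlt, List.drop_eq_getElem_cons hi1]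
      have hgi : l.getD i "" = l[i] := List.getD_eq_getElem l "" hlt
      have hgi1 : l.getD (i + 1) "" = l[i+1] := List.getD_eq_getElem l "" hi1
      rw [pvLoopA, if_pos hlt, hgi, hgi1, hd]
      have hrec := ih (n - 2) (by omega) (i + 2) (m ++ [l[i]]) (by omega) (by omega) (by omega)
      by_cases heq : l[i] = l[i+1]
      · rw [if_pos heq, hrec]
        simp only [pvEv, pvOd]
        by_cases ht : pvEv (l.drop (i + 2)) = pvOd (l.drop (i + 2))
        · rw [if_pos ht, if_pos (by rw [heq, ht])]
          simp
        · rw [if_neg ht, if_neg (by simp [ht])]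
      · rw [if_neg heq]
        simp only [pvEv, pvOd]
        rw [if_neg (by simp [heq])]
    · have hi : i = l.length := by omega
      rw [pvLoopA, if_neg hlt]
      simp [hi, List.drop_length, pvEv, pvOd]

theorem pvOdd_ne (l : List String) (h : l.length % 2 = 1) : pvEv l ≠ pvOd l := by
  intro he
  have := congrArg List.length he
  rw [pvEv_length, pvOd_length] at this
  omega

-- ===== VERDICT (by name: the statement is the Claim_ definition above) =====
theorem removeduplicates_from_name_double_occurances_spec : Claim_equal_removeduplicates_from_name_double_occurances := by
  intro name _
  unfold Spec_removeduplicates_from_name_double_occurances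
  unfold removeduplicates_from_name_double_occurances removeduplicates_from_name_double_occurances_alt
  set l := (PySem.Str.split? name " ").getD [] with hl
  simp only [pvEv_filter l 0 rfl, pvOd_filter l 0 rfl]
  by_cases hpar : l.length % 2 = 0
  · rw [if_pos hpar]
    rw [pvLoopA_eq l l.length 0 [] (by omega) (by omega) (by omega)]
    simp only [List.drop_zero]
    by_cases he : pvEv l = pvOd l
    · rw [if_pos he, if_pos he]; simp
    · rw [if_neg he, if_neg he]
  · rw [if_neg hpar, if_neg (pvOdd_ne l (by omega))]
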